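-- pv_equiv track=rewrite | github.com/dgoldman0/graphnumbers | reboot/canonical_graph.py | induced_subgraph
-- ===== SOURCE A (Python) =====
-- def induced_subgraph(adj, vertices):
--     """
--     Induced subgraph on 'vertices' (list of old indices), relabeled to 0..k-1.
--     Returns bitset adjacency tuple of length k.
--     """
--     n = len(adj)
--     vs = list(vertices)
--     k = len(vs)
--     if k == 0:
--         return tuple()
--
--     old_to_new = [-1] * n
--     for i, v in enumerate(vs):
--         old_to_new[v] = i
--
--     set_mask = 0
--     for v in vs:
--         set_mask |= 1 << v
--
--     sub = [0] * k
--     for i_new, v_old in enumerate(vs):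
--         b = adj[v_old] & set_mask
--         mapped = 0
--         while b:
--             lsb = b & -b
--             w_old = lsb.bit_length() - 1
--             j_new = old_to_new[w_old]
--             mapped |= 1 << j_new
--             b -= lsb
--         sub[i_new] = mapped
--
--     return tuple(sub)
-- ===== SOURCE B (Python) =====
-- def induced_subgraph(adj, vertices):
--     """
--     Induced subgraph on 'vertices' (list of old indices), relabeled to 0..k-1.
--     Returns bitset adjacency tuple of length k.
--     """
--     n = len(adj)
--     vs = list(vertices)
--     if not vs:
--         return ()
--
--     old_to_new = [-1] * n
--     for i, v in enumerate(vs):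
--         old_to_new[v] = i
--
--     rows = []
--     for v_old in vs:
--         row = adj[v_old]
--         mapped = 0
--         for w_old in vs:
--             if (row >> w_old) & 1:
--                 mapped |= 1 << old_to_new[w_old]
--         rows.append(mapped)
--     return tuple(rows)
-- ===== Notes on version B (the rewrite author's own statement) =====
-- stated objective: alternative
-- what changed: Replaces A's masked-row LSB-decoding while-loop (set_mask plus bit_length/lowest-set-bit extraction) with a direct pairwise scan: for each selected row, test the bit of every selected vertex and OR in its relabeled bit, so set_mask and the bit-decode loop disappear.
import Mathlib
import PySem

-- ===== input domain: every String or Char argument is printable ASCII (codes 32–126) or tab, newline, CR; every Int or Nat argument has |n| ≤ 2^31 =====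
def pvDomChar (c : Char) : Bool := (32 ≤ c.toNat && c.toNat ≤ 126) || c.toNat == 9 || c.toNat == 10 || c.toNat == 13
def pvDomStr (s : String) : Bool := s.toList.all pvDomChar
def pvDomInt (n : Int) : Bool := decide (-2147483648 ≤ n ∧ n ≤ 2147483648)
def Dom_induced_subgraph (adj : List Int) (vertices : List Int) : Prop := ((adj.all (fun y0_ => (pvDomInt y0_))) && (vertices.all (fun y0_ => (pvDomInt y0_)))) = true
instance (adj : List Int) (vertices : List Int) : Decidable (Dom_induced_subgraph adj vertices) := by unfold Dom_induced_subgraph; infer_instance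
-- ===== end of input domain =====

-- B replaces A's masked-row lowest-set-bit decoding loop by a direct pairwise bit test over the
-- selected vertices (objective: alternative algorithm of similar cost).

-- ===== PORT A =====

-- Python `1 << k` for nonnegative k, as an Int shifted by a Nat exponent (PySem convention).
def pyOneShl (k : Nat) : Int := 1 <<< k

-- Python `x >> k` for nonnegative k (Int floor shift by a Nat exponent, PySem convention).
def pyShr (x : Int) (k : Nat) : Int := x >>> k

-- `b & -b` under `0 < b`, written as a Nat expression (used for the loop's termination measure).
lemma pv_band_neg_self (b : Int) (hb : 0 < b) :
    PySem.Int.band b (-b) = ((b.toNat - (b.toNat &&& (b.toNat - 1)) : Nat) : Int) := by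
  have h1 : 0 ≤ b := le_of_lt hb
  have h3 : ¬ (0 ≤ -b) := by omega
  simp only [PySem.Int.band, if_pos h1, if_neg h3]
  have h4 : (- -b - 1).toNat = b.toNat - 1 := by omega
  rw [h4]

lemma pv_and_pred_lt (m : Nat) (hm : 0 < m) : m &&& (m - 1) < m :=
  lt_of_le_of_lt Nat.and_le_right (by omega)

-- Python:  while b: lsb = b & -b; w_old = lsb.bit_length() - 1; j_new = old_to_new[w_old];
--          mapped |= 1 << j_new; b -= lsb
-- The loop state satisfies 0 ≤ b throughout (b starts as `adj[v_old] & set_mask` with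
-- set_mask ≥ 0), so Python's truthiness test `while b` is written as `0 < b`.
-- `1 << j_new`: j_new ≥ 0 on every reachable iteration (the decoded bit is a selected vertex).
def pyDecodeRow (b : Int) (old_to_new : List Int) (mapped : Int) : Int :=
  if hb : 0 < b then
    pyDecodeRow (b - PySem.Int.band b (-b)) old_to_new
      (PySem.Int.bor mapped (pyOneShl
        (PySem.List.pyGetD old_to_new
          ((PySem.Int.bitLength (PySem.Int.band b (-b)) : Int) - 1) (-1)).toNat))
  else mapped
termination_by b.toNat
decreasing_by
  rw [pv_band_neg_self b hb]
  have h1 := pv_and_pred_lt b.toNat (by omega)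
  have h2 : b.toNat &&& (b.toNat - 1) ≤ b.toNat - 1 := Nat.and_le_right
  omega

-- Python A, line by line; the result rows are produced in order (sub[i_new] = mapped).
def induced_subgraph (adj : List Int) (vertices : List Int) : List Int :=
  let vs := vertices
  let k := vs.length
  if k = 0 then []
  else
    -- old_to_new = [-1]*n; for i, v in enumerate(vs): old_to_new[v] = i
    let old_to_new := (PySem.List.enumerate vs 0).foldl
      (fun o iv => PySem.List.pySetD o iv.2 iv.1) (List.replicate adj.length (-1 : Int))
    -- set_mask |= 1 << v   (v ≥ 0 under Pre_, where Python does not raise)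
    let set_mask := vs.foldl (fun m v => PySem.Int.bor m (pyOneShl v.toNat)) (0 : Int)
    vs.map (fun v_old =>
      pyDecodeRow (PySem.Int.band (PySem.List.pyGetD adj v_old (0:Int)) set_mask) old_to_new 0)

-- ===== PORT B =====

-- Python B, line by line: same old_to_new table, then a pairwise scan
-- `if (row >> w_old) & 1: mapped |= 1 << old_to_new[w_old]` over w_old in vs.
def induced_subgraph_alt (adj : List Int) (vertices : List Int) : List Int :=
  let vs := vertices
  if vs = [] then []
  else
    let old_to_new := (PySem.List.enumerate vs 0).foldl
      (fun o iv => PySem.List.pySetD o iv.2 iv.1) (List.replicate adj.length (-1 : Int))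
    vs.map (fun v_old =>
      vs.foldl (fun mapped w_old =>
        if PySem.Int.band (pyShr (PySem.List.pyGetD adj v_old (0:Int)) w_old.toNat) 1 = 1 then
          PySem.Int.bor mapped (pyOneShl (PySem.List.pyGetD old_to_new w_old (-1)).toNat)
        else mapped) (0 : Int))

-- ===== PRECONDITION & SPEC =====

-- Exactly the inputs where Python A returns: every selected vertex is a valid nonnegative
-- index into adj (a negative v raises ValueError at `1 << v`, v ≥ len(adj) raises IndexError).
def Pre_induced_subgraph (adj : List Int) (vertices : List Int) : Prop :=
  ∀ v ∈ vertices, 0 ≤ v ∧ v < (adj.length : Int)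
instance (adj : List Int) (vertices : List Int) : Decidable (Pre_induced_subgraph adj vertices) := by
  unfold Pre_induced_subgraph; infer_instance

def pvWitness_induced_subgraph : List Int × List Int := ([1, 2, 1], [0, 2])

def Spec_induced_subgraph (adj : List Int) (vertices : List Int) (out : List Int) : Prop :=
  out = induced_subgraph_alt adj vertices
instance (adj : List Int) (vertices : List Int) (out : List Int) :
    Decidable (Spec_induced_subgraph adj vertices out) := by
  unfold Spec_induced_subgraph; infer_instance

-- ===== CLAIM (what is proved, stated in full; the proofs are below) =====
def Claim_equal_induced_subgraph : Prop := ∀ (adj : List Int) (vertices : List Int), Dom_induced_subgraph adj vertices → Pre_induced_subgraph adj vertices → Spec_induced_subgraph adj vertices (induced_subgraph adj vertices)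

-- ===== LEMMAS AND PROOFS =====

lemma pv_testBit_div_mod (m n : Nat) : m.testBit n = decide ((m / 2 ^ n) % 2 = 1) := by
  rw [Nat.testBit, Nat.and_comm, Nat.and_one_is_mod, Nat.shiftRight_eq_div_pow]
  rcases Nat.mod_two_eq_zero_or_one (m / 2 ^ n) with h | h <;> simp [h]

lemma pv_testBit_mul_pow_add (a t b j : Nat) (hb : b < 2 ^ t) :
    (a * 2 ^ t + b).testBit j = if j < t then b.testBit j else a.testBit (j - t) := by
  by_cases hj : j < t
  · have ht : (2:Nat) ^ t = 2 ^ j * 2 ^ (t - j) := by rw [← pow_add]; congr 1; omega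
    have e0 : a * 2 ^ t + b = b + (a * 2 ^ (t - j)) * 2 ^ j := by rw [ht]; ring
    have e1 : (a * 2 ^ t + b) / 2 ^ j = b / 2 ^ j + a * 2 ^ (t - j) := by
      rw [e0, Nat.add_mul_div_right _ _ (pow_pos (by norm_num : (0:Nat) < 2) j)]
    obtain ⟨sj, hs⟩ : ∃ sj, t - j = sj + 1 := ⟨t - j - 1, by omega⟩
    have e2 : a * 2 ^ (t - j) = 2 * (a * 2 ^ sj) := by
      rw [hs, pow_succ]; ring
    rw [if_pos hj, pv_testBit_div_mod, pv_testBit_div_mod, decide_eq_decide, e1, e2]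
    omega
  · have h2j : (2:Nat) ^ j = 2 ^ t * 2 ^ (j - t) := by rw [← pow_add]; congr 1; omega
    have e0 : a * 2 ^ t + b = b + a * 2 ^ t := by ring
    have e1 : (a * 2 ^ t + b) / 2 ^ t = a := by
      rw [e0, Nat.add_mul_div_right _ _ (pow_pos (by norm_num : (0:Nat) < 2) t),
        Nat.div_eq_of_lt hb]
      omega
    have e2 : (a * 2 ^ t + b) / 2 ^ j = a / 2 ^ (j - t) := by
      rw [h2j, ← Nat.div_div_eq_div_mul, e1]
    rw [if_neg hj, pv_testBit_div_mod, pv_testBit_div_mod, decide_eq_decide, e2]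

lemma pv_and_div_two (x y : Nat) : (x &&& y) / 2 = (x / 2) &&& (y / 2) := by
  apply Nat.eq_of_testBit_eq
  intro i
  rw [Nat.testBit_div_two, Nat.testBit_and, Nat.testBit_and, Nat.testBit_div_two,
    Nat.testBit_div_two]

lemma pv_xor_div_two (x y : Nat) : (x ^^^ y) / 2 = (x / 2) ^^^ (y / 2) := by
  apply Nat.eq_of_testBit_eq
  intro i
  rw [Nat.testBit_div_two, Nat.testBit_xor, Nat.testBit_xor, Nat.testBit_div_two,
    Nat.testBit_div_two]

lemma pv_and_mod_two (x y : Nat) : (x &&& y) % 2 = x % 2 * (y % 2) := by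
  have h := Nat.testBit_and x y 0
  simp only [Nat.testBit_zero] at h
  rcases Nat.mod_two_eq_zero_or_one x with hx | hx <;>
    rcases Nat.mod_two_eq_zero_or_one y with hy | hy <;>
    rcases Nat.mod_two_eq_zero_or_one (x &&& y) with hz | hz <;>
    simp [hx, hy, hz] at h ⊢

lemma pv_xor_mod_two (x y : Nat) : (x ^^^ y) % 2 = (x % 2 + y % 2) % 2 := by
  have h := Nat.testBit_xor x y 0
  simp only [Nat.testBit_zero] at h
  rcases Nat.mod_two_eq_zero_or_one x with hx | hx <;>
    rcases Nat.mod_two_eq_zero_or_one y with hy | hy <;>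
    rcases Nat.mod_two_eq_zero_or_one (x ^^^ y) with hz | hz <;>
    simp [hx, hy, hz] at h ⊢

-- a - (a & c) is a bitwise operation: it equals a ^ (a & c) (the subtracted part is a sub-mask).
lemma pv_sub_and (a : Nat) : ∀ c : Nat, a - (a &&& c) = a ^^^ (a &&& c) := by
  induction a using Nat.strong_induction_on with
  | _ a ih =>
    intro c
    rcases Nat.eq_zero_or_pos a with ha | ha
    · subst ha; simp
    · have ihh := ih (a / 2) (by omega) (c / 2)
      have e1 : (a &&& c) / 2 = (a / 2) &&& (c / 2) := pv_and_div_two a c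
      have e3 : (a ^^^ (a &&& c)) / 2 = a / 2 - ((a / 2) &&& (c / 2)) := by
        rw [pv_xor_div_two, e1, ← ihh]
      have key : (a ^^^ (a &&& c)) / 2 = a / 2 - (a &&& c) / 2 := by rw [e3, e1]
      have hsdiv : (a &&& c) / 2 ≤ a / 2 := by rw [e1]; exact Nat.and_le_left
      have hm : (a &&& c) % 2 = a % 2 * (c % 2) := pv_and_mod_two a c
      have hsb : (a &&& c) % 2 ≤ a % 2 := by
        rw [hm]
        calc a % 2 * (c % 2) ≤ a % 2 * 1 := Nat.mul_le_mul_left _ (by omega)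
          _ = a % 2 := by ring
      have hx2 : (a ^^^ (a &&& c)) % 2 = (a % 2 + (a &&& c) % 2) % 2 :=
        pv_xor_mod_two a (a &&& c)
      omega

lemma pv_bitLength_two_pow (t : Nat) : PySem.Int.bitLength ((2 ^ t : Nat) : Int) = t + 1 := by
  have h1 := PySem.Int.lt_two_pow_bitLength ((2 ^ t : Nat) : Int)
  have h2 := PySem.Int.two_pow_bitLength_le ((2 ^ t : Nat) : Int)
    (by positivity)
  rw [Int.natAbs_natCast] at h1 h2
  have h3 : t < PySem.Int.bitLength ((2 ^ t : Nat) : Int) :=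
    (Nat.pow_lt_pow_iff_right (by norm_num)).mp h1
  have h4 : PySem.Int.bitLength ((2 ^ t : Nat) : Int) - 1 ≤ t :=
    (Nat.pow_le_pow_iff_right (by norm_num)).mp h2
  omega

lemma pv_succ_double_testBit (q i : Nat) :
    (2 * q + 1).testBit i = (decide (i = 0) || (2 * q).testBit i) := by
  cases i with
  | zero =>
    rw [Nat.testBit_zero, Nat.testBit_zero]
    have h1 : (2 * q + 1) % 2 = 1 := by omega
    have h2 : (2 * q) % 2 = 0 := by omega
    simp [h1, h2]
  | succ i =>
    rw [Nat.testBit_succ, Nat.testBit_succ]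
    have h1 : (2 * q + 1) / 2 = q := by omega
    have h2 : (2 * q) / 2 = q := by omega
    simp [h1, h2]

lemma pv_and_pred_decomp (t q : Nat) :
    (2 ^ t * (2 * q + 1)) &&& (2 ^ t * (2 * q + 1) - 1) = 2 ^ t * (2 * q) := by
  have hP : 0 < (2:Nat) ^ t := pow_pos (by norm_num : (0:Nat) < 2) t
  have hm : 2 ^ t * (2 * q + 1) = (2 * q + 1) * 2 ^ t + 0 := by ring
  have hm1 : 2 ^ t * (2 * q + 1) - 1 = (2 * q) * 2 ^ t + (2 ^ t - 1) := by
    have h : 2 ^ t * (2 * q + 1) = 2 * q * 2 ^ t + 2 ^ t := by ring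
    omega
  have hr : 2 ^ t * (2 * q) = (2 * q) * 2 ^ t + 0 := by ring
  apply Nat.eq_of_testBit_eq
  intro j
  rw [Nat.testBit_and, hm1, hm, hr,
    pv_testBit_mul_pow_add _ _ _ _ hP,
    pv_testBit_mul_pow_add _ _ _ _ (by omega),
    pv_testBit_mul_pow_add _ _ _ _ hP]
  by_cases hj : j < t
  · simp [hj, Nat.testBit_two_pow_sub_one]
  · simp only [if_neg hj]
    rcases Nat.eq_zero_or_pos (j - t) with hi | hi
    · rw [hi, Nat.testBit_zero, Nat.testBit_zero]
      have h2 : (2 * q) % 2 = 0 := by omega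
      simp [h2]
    · have hii : j - t = (j - t - 1) + 1 := by omega
      rw [hii, Nat.testBit_succ, Nat.testBit_succ]
      have h1 : (2 * q + 1) / 2 = q := by omega
      have h2 : (2 * q) / 2 = q := by omega
      rw [h1, h2, Bool.and_self]

lemma pv_one_shiftLeft (k : Nat) : pyOneShl k = ((2 ^ k : Nat) : Int) := by
  unfold pyOneShl; rw [Nat.shiftLeft_eq]; norm_num

-- Characterization of A's inner decode loop by the bits of its arguments.
lemma pv_decode_char (otn : List Int) : ∀ m : Nat, ∀ mapped : Int, 0 ≤ mapped →
    0 ≤ pyDecodeRow (↑m) otn mapped ∧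
    ∀ j, ((pyDecodeRow (↑m) otn mapped).toNat.testBit j = true ↔
      (mapped.toNat.testBit j = true ∨
        ∃ w, m.testBit w = true ∧ (PySem.List.pyGetD otn (↑w) (-1)).toNat = j)) := by
  intro m
  induction m using Nat.strong_induction_on with
  | _ m ih =>
    intro mapped hmap
    rcases Nat.eq_zero_or_pos m with h0 | hpos
    · subst h0
      rw [pyDecodeRow]
      simp only [Nat.cast_zero, lt_irrefl, dite_false]
      refine ⟨hmap, fun j => ?_⟩
      simp [Nat.zero_testBit]
    · have hmpos : (0:Int) < (↑m : Int) := by exact_mod_cast hpos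
      obtain ⟨t, c, hodd, hmeq⟩ := Nat.exists_eq_two_pow_mul_odd (by omega : m ≠ 0)
      have hcmod : c % 2 = 1 := Nat.odd_iff.mp hodd
      have hqq : c = 2 * (c / 2) + 1 := by omega
      set q := c / 2 with hqdef
      have hmq : m = 2 ^ t * (2 * q + 1) := by rw [hmeq, ← hqq]
      have hP : 0 < (2:Nat) ^ t := pow_pos (by norm_num : (0:Nat) < 2) t
      -- the decoded lowest set bit
      have hlsb : PySem.Int.band (↑m) (-↑m) = ((2 ^ t : Nat) : Int) := by
        rw [pv_band_neg_self _ hmpos, Int.toNat_natCast]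
        have hand : m &&& (m - 1) = 2 ^ t * (2 * q) := by
          rw [hmq]; exact pv_and_pred_decomp t q
        rw [hand]
        congr 1
        have h : 2 ^ t * (2 * q + 1) = 2 ^ t * (2 * q) + 2 ^ t := by ring
        omega
      have hwold : ((PySem.Int.bitLength (PySem.Int.band (↑m) (-↑m)) : Int) - 1) = ((t : Nat) : Int) := by
        rw [hlsb, pv_bitLength_two_pow]; push_cast; ring
      have hnext : (↑m : Int) - PySem.Int.band (↑m) (-↑m) = ((2 ^ t * (2 * q) : Nat) : Int) := by
        rw [hlsb, hmq]; push_cast; ring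
      set jt := (PySem.List.pyGetD otn ((t : Nat) : Int) (-1)).toNat with hjt
      have hsh : pyOneShl jt = ((2 ^ jt : Nat) : Int) := pv_one_shiftLeft jt
      have hmap' : PySem.Int.bor mapped (pyOneShl jt) =
          ((mapped.toNat ||| 2 ^ jt : Nat) : Int) := by
        rw [hsh, PySem.Int.bor_of_nonneg hmap (by positivity)]
        congr 1
      have hlt : 2 ^ t * (2 * q) < m := by
        rw [hmq]
        nlinarith [hP]
      have hmapnn : (0:Int) ≤ ((mapped.toNat ||| 2 ^ jt : Nat) : Int) := by positivity
      have ihh := ih (2 ^ t * (2 * q)) hlt ((mapped.toNat ||| 2 ^ jt : Nat) : Int) hmapnn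
      -- unfold one loop iteration
      rw [pyDecodeRow]
      simp only [dif_pos hmpos]
      rw [hwold, ← hjt, hmap', hnext]
      refine ⟨ihh.1, fun j => ?_⟩
      rw [ihh.2 j]
      have hbit : ∀ w, m.testBit w = (decide (w = t) || (2 ^ t * (2 * q)).testBit w) := by
        intro w
        have e1 : m = (2 * q + 1) * 2 ^ t + 0 := by rw [hmq]; ring
        have e2 : 2 ^ t * (2 * q) = (2 * q) * 2 ^ t + 0 := by ring
        rw [e1, e2, pv_testBit_mul_pow_add _ _ _ _ hP, pv_testBit_mul_pow_add _ _ _ _ hP]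
        by_cases hw : w < t
        · have : ¬ (w = t) := by omega
          simp [hw, this, Nat.zero_testBit]
        · have : (w = t) ↔ (w - t = 0) := by omega
          simp only [if_neg hw, pv_succ_double_testBit q (w - t), this]
      constructor
      · rintro (hmm | ⟨w, hw, hpw⟩)
        · rw [Int.toNat_natCast, Nat.testBit_or, Bool.or_eq_true] at hmm
          rcases hmm with hmm | hmm
          · exact Or.inl hmm
          · rw [Nat.testBit_two_pow] at hmm
            exact Or.inr ⟨t, by rw [hbit t]; simp, of_decide_eq_true hmm⟩
        · exact Or.inr ⟨w, by rw [hbit w]; simp [hw], hpw⟩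
      · rintro (hmm | ⟨w, hw, hpw⟩)
        · left
          rw [Int.toNat_natCast, Nat.testBit_or, Bool.or_eq_true]
          exact Or.inl hmm
        · rw [hbit w, Bool.or_eq_true] at hw
          rcases hw with hw | hw
          · have hwt : w = t := of_decide_eq_true hw
            subst hwt
            left
            rw [Int.toNat_natCast, Nat.testBit_or, Bool.or_eq_true]
            right
            rw [Nat.testBit_two_pow]
            exact decide_eq_true hpw
          · exact Or.inr ⟨w, hw, hpw⟩

-- Characterization of A's set_mask fold.
lemma pv_mask_bits : ∀ (vs : List Int) (acc : Int), (∀ v ∈ vs, 0 ≤ v) → 0 ≤ acc →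
    0 ≤ vs.foldl (fun m v => PySem.Int.bor m (pyOneShl v.toNat)) acc ∧
    ∀ w : Nat, ((vs.foldl (fun m v => PySem.Int.bor m (pyOneShl v.toNat)) acc).toNat.testBit w = true ↔
      (acc.toNat.testBit w = true ∨ ((w : Nat) : Int) ∈ vs)) := by
  intro vs
  induction vs with
  | nil => intro acc _ hacc; refine ⟨hacc, fun w => ?_⟩; simp
  | cons v vs ihv =>
    intro acc hv hacc
    have hv0 : 0 ≤ v := hv v (by simp)
    have hacc' : PySem.Int.bor acc (pyOneShl v.toNat) =
        ((acc.toNat ||| 2 ^ v.toNat : Nat) : Int) := by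
      rw [pv_one_shiftLeft, PySem.Int.bor_of_nonneg hacc (by positivity)]
      congr 1
    have hnn : (0:Int) ≤ ((acc.toNat ||| 2 ^ v.toNat : Nat) : Int) := by positivity
    have ihh := ihv ((acc.toNat ||| 2 ^ v.toNat : Nat) : Int) (fun u hu => hv u (by simp [hu])) hnn
    rw [List.foldl_cons, hacc']
    refine ⟨ihh.1, fun w => ?_⟩
    rw [ihh.2 w, Int.toNat_natCast, Nat.testBit_or, Bool.or_eq_true, Nat.testBit_two_pow]
    constructor
    · rintro ((h | h) | h)
      · exact Or.inl h
      · right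
        have := of_decide_eq_true h
        have : ((w : Nat) : Int) = v := by omega
        simp [this]
      · right; simp [h]
    · rintro (h | h)
      · exact Or.inl (Or.inl h)
      · rcases List.mem_cons.mp h with h | h
        · left; right
          exact decide_eq_true (by omega)
        · exact Or.inr h

-- Characterization of B's per-row fold.
lemma pv_altfold_bits (otn : List Int) (row : Int) :
    ∀ (vs : List Int) (acc : Int), 0 ≤ acc →
    0 ≤ vs.foldl (fun mapped w_old =>
        if PySem.Int.band (pyShr row w_old.toNat) 1 = 1 then
          PySem.Int.bor mapped (pyOneShl (PySem.List.pyGetD otn w_old (-1)).toNat)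
        else mapped) acc ∧
    ∀ j, ((vs.foldl (fun mapped w_old =>
        if PySem.Int.band (pyShr row w_old.toNat) 1 = 1 then
          PySem.Int.bor mapped (pyOneShl (PySem.List.pyGetD otn w_old (-1)).toNat)
        else mapped) acc).toNat.testBit j = true ↔
      (acc.toNat.testBit j = true ∨
        ∃ v ∈ vs, PySem.Int.band (pyShr row v.toNat) 1 = 1 ∧
          (PySem.List.pyGetD otn v (-1)).toNat = j)) := by
  intro vs
  induction vs with
  | nil => intro acc hacc; refine ⟨hacc, fun j => ?_⟩; simp
  | cons v vs ihv =>
    intro acc hacc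
    rw [List.foldl_cons]
    by_cases hcond : PySem.Int.band (pyShr row v.toNat) 1 = 1
    · set jv := (PySem.List.pyGetD otn v (-1)).toNat with hjv
      have hacc' : PySem.Int.bor acc (pyOneShl jv) =
          ((acc.toNat ||| 2 ^ jv : Nat) : Int) := by
        rw [pv_one_shiftLeft, PySem.Int.bor_of_nonneg hacc (by positivity)]
        congr 1
      have hnn : (0:Int) ≤ ((acc.toNat ||| 2 ^ jv : Nat) : Int) := by positivity
      have ihh := ihv ((acc.toNat ||| 2 ^ jv : Nat) : Int) hnn
      rw [if_pos hcond, hacc']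
      refine ⟨ihh.1, fun j => ?_⟩
      rw [ihh.2 j, Int.toNat_natCast, Nat.testBit_or, Bool.or_eq_true, Nat.testBit_two_pow]
      constructor
      · rintro ((h | h) | h)
        · exact Or.inl h
        · right
          exact ⟨v, by simp, hcond, of_decide_eq_true h⟩
        · obtain ⟨u, hu, h1, h2⟩ := h
          exact Or.inr ⟨u, by simp [hu], h1, h2⟩
      · rintro (h | h)
        · exact Or.inl (Or.inl h)
        · obtain ⟨u, hu, h1, h2⟩ := h
          rcases List.mem_cons.mp hu with hu | hu
          · subst hu
            left; right
            exact decide_eq_true (by omega)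
          · exact Or.inr ⟨u, hu, h1, h2⟩
    · rw [if_neg hcond]
      have ihh := ihv acc hacc
      refine ⟨ihh.1, fun j => ?_⟩
      rw [ihh.2 j]
      constructor
      · rintro (h | h)
        · exact Or.inl h
        · obtain ⟨u, hu, h1, h2⟩ := h
          exact Or.inr ⟨u, by simp [hu], h1, h2⟩
      · rintro (h | h)
        · exact Or.inl h
        · obtain ⟨u, hu, h1, h2⟩ := h
          rcases List.mem_cons.mp hu with hu | hu
          · subst hu; exact absurd h1 hcond
          · exact Or.inr ⟨u, hu, h1, h2⟩

-- The bridge: bit w of `row & M` (M ≥ 0) is bit w of M together with Python's `(row >> w) & 1`.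
lemma pv_band_row_bits (row : Int) (M : Nat) :
    0 ≤ PySem.Int.band row (↑M) ∧
    ∀ w : Nat, ((PySem.Int.band row (↑M)).toNat.testBit w = true ↔
      (M.testBit w = true ∧ PySem.Int.band (pyShr row w) 1 = 1)) := by
  cases row with
  | ofNat R =>
    have hcast : Int.ofNat R = ((R : Nat) : Int) := rfl
    have h1 : PySem.Int.band (Int.ofNat R) (↑M) = ((R &&& M : Nat) : Int) := by
      rw [hcast, PySem.Int.band_of_nonneg (by positivity) (by positivity)]
      congr 1
    refine ⟨by rw [h1]; positivity, fun w => ?_⟩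
    have h2 : pyShr (Int.ofNat R) w = ((R >>> w : Nat) : Int) := by
      unfold pyShr; rw [hcast, ← Int.natCast_shiftRight]
    have h3 : PySem.Int.band (pyShr (Int.ofNat R) w) 1 = (((R >>> w) &&& 1 : Nat) : Int) := by
      rw [h2, PySem.Int.band_of_nonneg (by positivity) (by norm_num)]
      congr 1
    have h6 := Nat.testBit_shiftRight (i := w) (j := 0) R
    rw [Nat.testBit_zero, Nat.add_zero] at h6
    have h5 : ((R >>> w) &&& 1 = 1) ↔ R.testBit w = true := by
      rw [Nat.and_one_is_mod]
      constructor
      · intro h; rw [← h6]; exact decide_eq_true h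
      · intro h; rw [← h6] at h; exact of_decide_eq_true h
    rw [h1, Int.toNat_natCast, Nat.testBit_and, Bool.and_eq_true, h3]
    have h4 : ((((R >>> w) &&& 1 : Nat) : Int) = 1) ↔ ((R >>> w) &&& 1 = 1) := by
      exact_mod_cast Iff.rfl
    rw [h4, h5]
    tauto
  | negSucc C =>
    have hlt : ¬ (0 ≤ Int.negSucc C) := by
      rw [Int.negSucc_eq]; omega
    have hMnn : (0:Int) ≤ (↑M : Int) := by positivity
    have h1 : PySem.Int.band (Int.negSucc C) (↑M) = ((M - (M &&& C) : Nat) : Int) := by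
      simp only [PySem.Int.band, if_neg hlt, if_pos hMnn]
      have e1 : (-(Int.negSucc C) - 1).toNat = C := by
        rw [Int.negSucc_eq]; omega
      rw [e1, Int.toNat_natCast]
    refine ⟨by rw [h1]; positivity, fun w => ?_⟩
    have h2 : pyShr (Int.negSucc C) w = Int.negSucc (C >>> w) := by
      unfold pyShr; exact Int.negSucc_shiftRight C w
    have h3 : PySem.Int.band (pyShr (Int.negSucc C) w) 1 = ((1 - (1 &&& (C >>> w)) : Nat) : Int) := by
      rw [h2]
      have hlt2 : ¬ (0 ≤ Int.negSucc (C >>> w)) := by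
        generalize C >>> w = X
        rw [Int.negSucc_eq]; omega
      simp only [PySem.Int.band, if_neg hlt2, if_pos (by norm_num : (0:Int) ≤ 1)]
      have e1 : (-(Int.negSucc (C >>> w)) - 1).toNat = C >>> w := by
        generalize C >>> w = X
        rw [Int.negSucc_eq]; omega
      rw [e1]
      norm_num
    have h6 := Nat.testBit_shiftRight (i := w) (j := 0) C
    rw [Nat.testBit_zero, Nat.add_zero] at h6
    have h4 : (PySem.Int.band (pyShr (Int.negSucc C) w) 1 = 1) ↔ C.testBit w = false := by
      rw [h3, Nat.and_comm, Nat.and_one_is_mod, ← h6]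
      rcases Nat.mod_two_eq_zero_or_one (C >>> w) with h8 | h8 <;> rw [h8] <;> norm_num [h8]
    rw [h1, Int.toNat_natCast, h4, pv_sub_and, Nat.testBit_xor, Nat.testBit_and]
    cases hMw : M.testBit w <;> cases hCw : C.testBit w <;> simp

-- equality of two nonnegative Ints from bitwise equality of their toNats
lemma pv_int_eq_of_bits (a b : Int) (ha : 0 ≤ a) (hb : 0 ≤ b)
    (h : ∀ j, (a.toNat.testBit j = true ↔ b.toNat.testBit j = true)) : a = b := by
  have : a.toNat = b.toNat := by
    apply Nat.eq_of_testBit_eq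
    intro j
    have := h j
    cases h1 : a.toNat.testBit j <;> cases h2 : b.toNat.testBit j <;> simp [h1, h2] at this ⊢
  omega

-- ===== VERDICT (by name: the statement is the Claim_ definition above) =====
theorem induced_subgraph_spec : Claim_equal_induced_subgraph := by
  intro adj vertices _ hpre
  unfold Spec_induced_subgraph induced_subgraph induced_subgraph_alt
  by_cases hnil : vertices = []
  · subst hnil; simp
  · have hlen : ¬ (vertices.length = 0) := by
      simpa [List.length_eq_zero_iff] using hnil
    simp only [if_neg hlen, if_neg hnil]
    apply List.map_congr_left
    intro v_old hv_old
    set otn := (PySem.List.enumerate vertices 0).foldl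
      (fun o iv => PySem.List.pySetD o iv.2 iv.1) (List.replicate adj.length (-1 : Int)) with hotn
    set row := PySem.List.pyGetD adj v_old (0:Int) with hrow
    have hvnn : ∀ v ∈ vertices, 0 ≤ v := fun v hv => (hpre v hv).1
    -- the mask
    obtain ⟨hmask_nn, hmask_bits⟩ := pv_mask_bits vertices 0 hvnn (by norm_num)
    set mask := vertices.foldl (fun m v => PySem.Int.bor m (pyOneShl v.toNat)) (0:Int) with hmask
    have hmask_cast : mask = ((mask.toNat : Nat) : Int) := by omega
    -- the masked row
    obtain ⟨hb_nn, hb_bits⟩ := pv_band_row_bits row mask.toNat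
    rw [← hmask_cast] at hb_nn hb_bits
    have hb_cast : PySem.Int.band row mask = ((PySem.Int.band row mask).toNat : Int) := by omega
    -- characterize both sides
    obtain ⟨hL_nn, hL_bits⟩ := pv_decode_char otn (PySem.Int.band row mask).toNat 0 (by norm_num)
    rw [← hb_cast] at hL_nn hL_bits
    obtain ⟨hR_nn, hR_bits⟩ := pv_altfold_bits otn row vertices 0 (by norm_num)
    apply pv_int_eq_of_bits _ _ hL_nn hR_nn
    intro j
    rw [hL_bits j, hR_bits j]
    have hz : ((0:Int).toNat.testBit j = true) ↔ False := by simp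
    rw [hz]
    constructor
    · rintro (h | ⟨w, hw, hpw⟩)
      · exact absurd h id
      · right
        rw [hb_bits w] at hw
        obtain ⟨hmw, hcond⟩ := hw
        rw [hmask_bits w] at hmw
        rcases hmw with hmw | hmw
        · simp at hmw
        · refine ⟨((w : Nat) : Int), hmw, ?_, ?_⟩
          · have : ((w : Nat) : Int).toNat = w := by omega
            rw [this]; exact hcond
          · have : ((w : Nat) : Int).toNat = w := by omega
            exact hpw
    · rintro (h | ⟨u, hu, hcond, hpu⟩)
      · exact absurd h id
      · right
        have hu0 : 0 ≤ u := hvnn u hu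
        refine ⟨u.toNat, ?_, ?_⟩
        · rw [hb_bits u.toNat]
          refine ⟨?_, hcond⟩
          rw [hmask_bits u.toNat]
          right
          have : ((u.toNat : Nat) : Int) = u := by omega
          rw [this]; exact hu
        · have : ((u.toNat : Nat) : Int) = u := by omega
          rw [this]; exact hpu
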